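-- pv_equiv track=rewrite | github.com/Alexpro299999/crypto-labs | lab1.py | route_encrypt
-- ===== SOURCE A (Python) =====
-- import math
--
-- def route_encrypt(text, key):
--     """Шифрует текст маршрутным шифрованием."""
--     key_len = len(key)
--
--     # Создание таблицы соответствия: буква ключа -> номер столбца
--     sorted_key = sorted(list(set(key)))
--     key_order_map = {letter: i for i, letter in enumerate(sorted_key)}
--
--     # Получаем порядок чтения столбцов
--     # Пример "ДЕКАРТ": А(1) Д(2) Е(3) К(4) Р(5) Т(6) -> порядок [3,0,1,2,4,5]
--     indexed_key = sorted([(char, i) for i, char in enumerate(key)])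
--     read_order = [item[1] for item in indexed_key]
--
--     # Заполнение таблицы текстом
--     num_rows = math.ceil(len(text) / key_len)
--     # Дополняем текст, чтобы он полностью заполнил таблицу
--     padded_text = text.ljust(num_rows * key_len, ' ')
--
--     # Чтение по столбцам в нужном порядке
--     ciphertext = []
--     for col_idx in read_order:
--         for row_idx in range(num_rows):
--             char = padded_text[row_idx * key_len + col_idx]
--             if char != ' ':  # Игнорируем добавленные пробелы
--                 ciphertext.append(char)
--
--     return "".join(ciphertext)
-- ===== SOURCE B (Python) =====
-- def route_encrypt(text, key):
--     """Route/columnar transposition: scatter chars into column buckets, read columns in key order."""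
--     indexed_key = sorted([(char, i) for i, char in enumerate(key)])
--     read_order = [item[1] for item in indexed_key]
--
--     key_len = len(key)
--     cols = [[] for _ in range(key_len)]
--     for i, ch in enumerate(text):
--         cols[i % key_len].append(ch)
--
--     return "".join(ch for c in read_order for ch in cols[c] if ch != " ")
-- ===== Notes on version B (the rewrite author's own statement) =====
-- stated objective: simpler
-- what changed: Replaced the padded row-major table read via indices row*key_len+col (with ceil and ljust padding) by a single forward scatter pass distributing text characters into key_len column buckets, then reading the buckets in key order; padding is eliminated entirely because padding spaces are dropped anyway. Pre_ excludes key = '', on which A always raises ZeroDivisionError.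
import Mathlib
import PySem

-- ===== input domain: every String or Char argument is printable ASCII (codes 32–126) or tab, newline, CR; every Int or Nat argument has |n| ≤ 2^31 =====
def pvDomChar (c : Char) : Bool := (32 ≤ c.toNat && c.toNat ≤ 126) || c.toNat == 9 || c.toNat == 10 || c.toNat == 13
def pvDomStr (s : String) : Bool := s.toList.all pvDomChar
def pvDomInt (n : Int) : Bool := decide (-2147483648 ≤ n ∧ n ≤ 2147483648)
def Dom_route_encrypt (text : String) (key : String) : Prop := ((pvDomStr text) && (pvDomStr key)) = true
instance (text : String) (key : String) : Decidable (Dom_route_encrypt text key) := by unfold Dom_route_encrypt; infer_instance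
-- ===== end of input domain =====

-- B replaces A's padded row-major table read (ceil, ljust, row*key_len+col indices) by a single
-- scatter pass into per-column buckets read back in key order; padding is dropped as spaces are filtered anyway.

-- ===== PORT A =====
def route_encrypt (text : String) (key : String) : String :=
  let keyLen : Int := PySem.Str.len key
  let sortedKey := PySem.List.sorted (PySem.Set.ofList key.toList) (fun c => c) false
  let _keyOrderMap : PySem.Dict Char Int :=
    (PySem.List.enumerate sortedKey 0).foldl (fun d p => PySem.Dict.insert d p.2 p.1) PySem.Dict.empty
  let indexedKey :=
    PySem.List.sorted2 ((PySem.List.enumerate key.toList 0).map (fun p => (p.2, p.1)))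
      (fun x => x.1) (fun x => x.2) false
  let readOrder := indexedKey.map (fun x => x.2)
  -- math.ceil(len(text)/key_len), exact on these sizes: ceiling division -((-n)//k)
  let numRows : Int := -(PySem.Int.floordiv (-(PySem.Str.len text)) keyLen)
  -- text.ljust(num_rows*key_len, ' ')
  let paddedText := text.toList ++ List.replicate ((numRows * keyLen).toNat - text.toList.length) ' '
  let ciphertext := readOrder.foldl (fun acc colIdx =>
      (PySem.List.pyRange 0 numRows 1).foldl (fun acc2 rowIdx =>
        let c := PySem.List.pyGetD paddedText (rowIdx * keyLen + colIdx) ' '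
        if c ≠ ' ' then acc2 ++ [c] else acc2) acc) []
  String.ofList ciphertext

-- ===== PORT B =====
def route_encrypt_alt (text : String) (key : String) : String :=
  let indexedKey :=
    PySem.List.sorted2 ((PySem.List.enumerate key.toList 0).map (fun p => (p.2, p.1)))
      (fun x => x.1) (fun x => x.2) false
  let readOrder := indexedKey.map (fun x => x.2)
  let keyLen : Int := PySem.Str.len key
  -- cols = [[] for _ in range(key_len)]; for i, ch in enumerate(text): cols[i % key_len].append(ch)
  let cols : List (List Char) := (PySem.List.enumerate text.toList 0).foldl
    (fun cs p => PySem.List.pySetD cs (PySem.Int.mod p.1 keyLen)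
        (PySem.List.pyGetD cs (PySem.Int.mod p.1 keyLen) [] ++ [p.2]))
    (List.replicate keyLen.toNat [])
  String.ofList (readOrder.foldl
    (fun acc c => acc ++ (PySem.List.pyGetD cols c []).filter (fun ch => decide (ch ≠ ' '))) [])

-- ===== PRECONDITION & SPEC =====
-- Pre_ excludes key = "" only: there A always raises ZeroDivisionError (len(text)/0).
def Pre_route_encrypt (text : String) (key : String) : Prop := key ≠ ""
instance (text : String) (key : String) : Decidable (Pre_route_encrypt text key) := by
  unfold Pre_route_encrypt; infer_instance
def pvWitness_route_encrypt : String × String := ("attack at dawn", "cab")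

def Spec_route_encrypt (text : String) (key : String) (out : String) : Prop :=
  out = route_encrypt_alt text key
instance (text : String) (key : String) (out : String) : Decidable (Spec_route_encrypt text key out) := by
  unfold Spec_route_encrypt; infer_instance

-- ===== CLAIM =====
def Claim_equal_route_encrypt : Prop := ∀ (text : String) (key : String),
  Dom_route_encrypt text key → Pre_route_encrypt text key →
    Spec_route_encrypt text key (route_encrypt text key)

-- ===== LEMMAS AND PROOFS =====

-- characters of l (enumerated from offset s) whose absolute position is ≡ col (mod k), in order
def gatherCol (k col : Int) (l : List Char) (s : Int) : List Char :=
  ((PySem.List.enumerate l s).filter (fun p => PySem.Int.mod p.1 k == col)).map (fun p => p.2)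

theorem gatherCol_append (k col : Int) (l1 l2 : List Char) (s : Int) :
    gatherCol k col (l1 ++ l2) s = gatherCol k col l1 s ++ gatherCol k col l2 (s + l1.length) := by
  simp [gatherCol, PySem.List.enumerate_append, List.filter_append]

theorem gatherCol_cons (k col s : Int) (x : Char) (xs : List Char) :
    gatherCol k col (x :: xs) s =
      (if PySem.Int.mod s k == col then [x] else []) ++ gatherCol k col xs (s + 1) := by
  simp [gatherCol, PySem.List.enumerate_cons, List.filter_cons]
  split <;> simp

-- scatter loop invariant: bucket col collects exactly the chars at positions ≡ col (mod k)
theorem scatter_spec (k col : Int) (hk : 0 < k) :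
    ∀ (l : List Char) (s : Int) (cs : List (List Char)), 0 ≤ s → 0 ≤ col → col < (cs.length : Int) →
      cs.length = k.toNat →
      PySem.List.pyGetD
        ((PySem.List.enumerate l s).foldl
          (fun cs p => PySem.List.pySetD cs (PySem.Int.mod p.1 k)
            (PySem.List.pyGetD cs (PySem.Int.mod p.1 k) [] ++ [p.2])) cs) col []
      = PySem.List.pyGetD cs col [] ++ gatherCol k col l s := by
  intro l
  induction l with
  | nil => intro s cs _ _ _ _; simp [gatherCol, PySem.List.enumerate]
  | cons x xs ih =>
    intro s cs hs hc0 hc1 hlen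
    rw [PySem.List.enumerate_cons]
    simp only [List.foldl_cons]
    have hj0 : 0 ≤ PySem.Int.mod s k := PySem.Int.mod_nonneg s hk
    have hjk : PySem.Int.mod s k < k := PySem.Int.mod_lt s hk
    rw [ih (s+1) _ (by omega) hc0
      (by rw [PySem.List.length_pySetD]; exact hc1)
      (by rw [PySem.List.length_pySetD]; exact hlen)]
    rw [gatherCol_cons]
    have hset : PySem.List.pySetD cs (PySem.Int.mod s k)
        (PySem.List.pyGetD cs (PySem.Int.mod s k) [] ++ [x])
        = cs.set (PySem.Int.mod s k).toNat (PySem.List.pyGetD cs (PySem.Int.mod s k) [] ++ [x]) := by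
      rw [← PySem.List.pySetD_natCast cs (PySem.Int.mod s k).toNat, Int.toNat_of_nonneg hj0]
    rw [hset]
    rw [PySem.List.pyGetD_eq_getElem _ [] hc0 (by simpa using hc1)]
    rw [List.getElem_set]
    by_cases hcase : PySem.Int.mod s k = col
    · have heq : (PySem.Int.mod s k).toNat = col.toNat := by rw [hcase]
      simp only [hcase, beq_self_eq_true, if_pos]
      rw [PySem.List.pyGetD_eq_getElem cs [] hc0 (by omega)]
      simp [List.append_assoc]
    · have hne : (PySem.Int.mod s k).toNat ≠ col.toNat := by omega
      rw [if_neg hne]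
      have hb : (PySem.Int.mod s k == col) = false := by simp [hcase]
      simp only [hb, if_neg Bool.false_ne_true, List.nil_append]
      rw [PySem.List.pyGetD_eq_getElem cs [] hc0 (by omega)]

theorem gatherPos (k col : Int) :
    ∀ (l : List Char) (s : Int),
      gatherCol k col l s =
        (List.range l.length).filterMap
          (fun t : Nat => if PySem.Int.mod (s + (t : Int)) k == col then some (l.getD t ' ') else none) := by
  intro l
  induction l with
  | nil => intro s; simp [gatherCol, PySem.List.enumerate]
  | cons x xs ih =>
    intro s
    rw [gatherCol_cons, ih (s + 1)]
    rw [List.length_cons, List.range_succ_eq_map, List.filterMap_cons, List.filterMap_map]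
    have h0 : s + ((0 : Nat) : Int) = s := by norm_num
    rw [h0]
    have hfun : (fun t : Nat =>
        if PySem.Int.mod (s + ((Nat.succ t : Nat) : Int)) k == col then some ((x :: xs).getD (Nat.succ t) ' ') else none)
        = (fun t : Nat => if PySem.Int.mod (s + 1 + (t : Int)) k == col then some (xs.getD t ' ') else none) := by
      funext t
      have hcast : s + ((Nat.succ t : Nat) : Int) = s + 1 + (t : Int) := by push_cast; ring
      rw [hcast]
      rfl
    by_cases hc : (PySem.Int.mod s k == col) = true
    · rw [if_pos hc, if_pos hc]
      simp only [List.getD_cons_zero]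
      rw [show ((fun a : Nat => if PySem.Int.mod (s + (a : Int)) k == col then some ((x :: xs).getD a ' ') else none) ∘ Nat.succ)
          = (fun t : Nat => if PySem.Int.mod (s + ((Nat.succ t : Nat) : Int)) k == col then some ((x :: xs).getD (Nat.succ t) ' ') else none) from rfl,
        hfun]
      rfl
    · rw [if_neg (by simpa using hc), if_neg (by simpa using hc), List.nil_append]
      rw [show ((fun a : Nat => if PySem.Int.mod (s + (a : Int)) k == col then some ((x :: xs).getD a ' ') else none) ∘ Nat.succ)
          = (fun t : Nat => if PySem.Int.mod (s + ((Nat.succ t : Nat) : Int)) k == col then some ((x :: xs).getD (Nat.succ t) ' ') else none) from rfl,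
        hfun]

theorem filterMap_range_single {β : Type} (f : Nat → β) :
    ∀ (n c : Nat), c < n →
      (List.range n).filterMap (fun t => if t = c then some (f t) else none) = [f c] := by
  intro n
  induction n with
  | zero => intro c h; omega
  | succ m ih =>
    intro c h
    rw [List.range_succ, List.filterMap_append]
    by_cases hc : c = m
    · subst hc
      have hnil : (List.range c).filterMap (fun t => if t = c then some (f t) else none) = [] := by
        rw [List.filterMap_eq_nil_iff]
        intro a ha
        rw [List.mem_range] at ha
        simp [Nat.ne_of_lt ha]
      simp [hnil]
    · have hlt : c < m := by omega
      rw [ih c hlt]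
      simp [show ¬ m = c from fun h' => hc h'.symm]

-- a full block of k consecutive positions starting at a multiple of k contributes exactly its col-th char
theorem chunk_gather (k col : Int) (hk : 0 < k) (hc0 : 0 ≤ col) (hck : col < k)
    (l : List Char) (s : Int) (hs : PySem.Int.mod s k = 0) (hl : l.length = k.toNat) :
    gatherCol k col l s = [l.getD col.toNat ' '] := by
  rw [gatherPos]
  have hdvd : k ∣ s := (PySem.Int.mod_eq_zero_iff_dvd s k).mp hs
  have hmod : ∀ t : Nat, t < k.toNat → PySem.Int.mod (s + (t : Int)) k = (t : Int) := by
    intro t ht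
    rw [PySem.Int.mod_eq_emod_of_pos hk]
    obtain ⟨m, rfl⟩ := hdvd
    rw [Int.add_comm, Int.add_mul_emod_self_left]
    exact Int.emod_eq_of_lt (by positivity) (by omega)
  have hfun : ∀ t ∈ List.range l.length,
      (if PySem.Int.mod (s + (t : Int)) k == col then some (l.getD t ' ') else none)
      = (if t = col.toNat then some (l.getD t ' ') else none) := by
    intro t ht
    rw [List.mem_range, hl] at ht
    rw [hmod t ht]
    by_cases h : t = col.toNat
    · have hb : ((t : Int) == col) = true := by simp; omega
      rw [hb, h]; simp
    · have hb : ((t : Int) == col) = false := by simp; omega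
      rw [hb, if_neg h]
      simp
  rw [List.filterMap_congr hfun, filterMap_range_single _ _ _ (by omega)]

-- a rectangle of R full rows read by gatherCol is the row-major column read of A
theorem rect_gather (k col : Int) (hk : 0 < k) (hc0 : 0 ≤ col) (hck : col < k) :
    ∀ (R : Nat) (l : List Char) (s : Int), PySem.Int.mod s k = 0 → l.length = R * k.toNat →
      gatherCol k col l s =
        (List.range R).map (fun r => l.getD (r * k.toNat + col.toNat) ' ') := by
  intro R
  induction R with
  | zero =>
    intro l s _ hl
    simp at hl
    simp [hl, gatherCol]
  | succ R ih =>
    intro l s hs hl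
    have hK : 0 < k.toNat := by omega
    have hCK : col.toNat < k.toNat := by omega
    have hlen : k.toNat ≤ l.length := by rw [hl]; nlinarith
    have htake : (l.take k.toNat).length = k.toNat := by simp [List.length_take]; omega
    have hdrop : (l.drop k.toNat).length = R * k.toNat := by
      simp [List.length_drop, hl]; ring_nf; omega
    have hsK : PySem.Int.mod (s + (k.toNat : Int)) k = 0 := by
      rw [PySem.Int.mod_eq_zero_iff_dvd] at hs ⊢
      have hkk : ((k.toNat : Int)) = k := Int.toNat_of_nonneg (le_of_lt hk)
      exact dvd_add hs (hkk ▸ dvd_refl k)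
    calc gatherCol k col l s
        = gatherCol k col (l.take k.toNat ++ l.drop k.toNat) s := by rw [List.take_append_drop]
      _ = gatherCol k col (l.take k.toNat) s ++ gatherCol k col (l.drop k.toNat) (s + (l.take k.toNat).length) := by
          rw [gatherCol_append]
      _ = [l.getD col.toNat ' '] ++ (List.range R).map (fun r => (l.drop k.toNat).getD (r * k.toNat + col.toNat) ' ') := by
          rw [chunk_gather k col hk hc0 hck _ s hs htake, htake, ih (l.drop k.toNat) _ hsK hdrop]
          congr 2
          rw [List.getD_eq_getElem _ _ (by omega), List.getD_eq_getElem _ _ (show col.toNat < l.length by omega)]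
          exact List.getElem_take
      _ = (List.range (R + 1)).map (fun r => l.getD (r * k.toNat + col.toNat) ' ') := by
          rw [List.range_succ_eq_map, List.map_cons, List.map_map]
          simp only [Nat.zero_mul, Nat.zero_add, List.singleton_append]
          congr 1
          apply List.map_congr_left
          intro r hr
          rw [List.mem_range] at hr
          have h3 : r + 1 ≤ R := hr
          have h1 : r * k.toNat + col.toNat < R * k.toNat :=
            lt_of_lt_of_le (by nlinarith) (Nat.mul_le_mul_right _ h3)
          have h2 : (r + 1) * k.toNat + col.toNat < (R + 1) * k.toNat := by nlinarith
          rw [Function.comp_apply]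
          rw [List.getD_eq_getElem _ _ (by rw [hdrop]; exact h1),
              List.getD_eq_getElem _ _ (by rw [hl]; simpa [Nat.succ_eq_add_one] using h2)]
          rw [List.getElem_drop]
          congr 1
          simp [Nat.succ_eq_add_one]
          ring

theorem gather_replicate_space (k col s : Int) (m : Nat) (c : Char)
    (hc : c ∈ gatherCol k col (List.replicate m ' ') s) : c = ' ' := by
  unfold gatherCol at hc
  obtain ⟨p, hp, rfl⟩ := List.mem_map.mp hc
  have hp' := List.mem_of_mem_filter hp
  obtain ⟨j, hj, rfl⟩ := (PySem.List.mem_enumerate_iff _ _ _).mp hp'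
  simp

theorem mem_readOrder_bounds (key : String) (col : Int)
    (h : col ∈ (PySem.List.sorted2 ((PySem.List.enumerate key.toList 0).map (fun p => (p.2, p.1)))
        (fun x => x.1) (fun x => x.2) false).map (fun x => x.2)) :
    0 ≤ col ∧ col < (key.toList.length : Int) := by
  obtain ⟨pr, hpr, rfl⟩ := List.mem_map.mp h
  have hmem := (PySem.List.sorted2_perm _ _ _ _).mem_iff.mp hpr
  obtain ⟨q, hq, rfl⟩ := List.mem_map.mp hmem
  obtain ⟨j, hj, rfl⟩ := (PySem.List.mem_enumerate_iff _ _ _).mp hq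
  dsimp only
  constructor <;> omega

-- ===== VERDICT =====
theorem route_encrypt_spec : Claim_equal_route_encrypt := by
  intro text key _ hpre
  unfold Spec_route_encrypt route_encrypt route_encrypt_alt
  simp only [PySem.Str.len_eq]
  have hKnil : key.toList ≠ [] := fun h => hpre (String.toList_eq_nil_iff.mp h)
  have hKpos : 0 < key.toList.length := List.length_pos_iff.mpr hKnil
  set K : Nat := key.toList.length with hKdef
  set k : Int := (K : Int) with hkdef
  have hk : 0 < k := by omega
  set n : Nat := text.toList.length with hndef
  set numRows : Int := -(PySem.Int.floordiv (-(n : Int)) k) with hRdef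
  have hbr := (PySem.Int.neg_floordiv_neg_eq_iff_of_pos (a := (n : Int)) (b := k) hk).mp hRdef.symm
  have hRa : ((numRows - 1) * k < (n : Int)) := hbr.1
  have hRb : ((n : Int) ≤ numRows * k) := hbr.2
  have hR0 : 0 ≤ numRows := by nlinarith
  set R : Nat := numRows.toNat with hRn
  have hcastR : (R : Int) = numRows := Int.toNat_of_nonneg hR0
  have hcastRK : (numRows * k).toNat = R * K := by
    have : numRows * k = ((R * K : Nat) : Int) := by push_cast; rw [hcastR]
    rw [this, Int.toNat_natCast]
  have hnRK : n ≤ R * K := by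
    have := hRb
    rw [show numRows * k = ((R * K : Nat) : Int) by push_cast; rw [hcastR]] at this
    exact_mod_cast this
  set padded : List Char := text.toList ++ List.replicate ((numRows * k).toNat - n) ' ' with hpad
  have htl : text.toList.length = text.length := by simp
  have hpadlen : padded.length = R * K := by
    simp [hpad, hcastRK]
    omega
  congr 1
  apply PySem.List.foldl_congr_mem
  intro acc col hcol
  obtain ⟨hc0, hck⟩ := mem_readOrder_bounds key col hcol
  rw [← hKdef] at hck
  -- A side: inner loop is append-if over the rows
  rw [PySem.List.foldl_append_ite (p := fun rowIdx => PySem.List.pyGetD padded (rowIdx * k + col) ' ' ≠ ' ')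
      (f := fun rowIdx => PySem.List.pyGetD padded (rowIdx * k + col) ' ')]
  -- B side: the bucket is gatherCol
  rw [scatter_spec k col hk text.toList 0 (List.replicate k.toNat []) le_rfl hc0
      (by simp; omega) (by simp)]
  rw [PySem.List.pyGetD_eq_getElem _ [] hc0 (by simp; omega), List.getElem_replicate, List.nil_append]
  congr 1
  -- both are the space-filtered column
  have hck' : col < k := by omega
  have hmod0 : PySem.Int.mod 0 k = 0 := by rw [PySem.Int.mod_eq_emod_of_pos hk]; simp
  have hrect := rect_gather k col hk hc0 hck' R padded 0 hmod0 hpadlen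
  rw [show k.toNat = K from Int.toNat_natCast K] at hrect
  have hmapA : (PySem.List.pyRange 0 numRows 1).map (fun rowIdx => PySem.List.pyGetD padded (rowIdx * k + col) ' ')
      = (List.range R).map (fun r => padded.getD (r * K + col.toNat) ' ') := by
    rw [PySem.List.pyRange_zero, List.map_map]
    apply List.map_congr_left
    intro r _
    have hidx : ((r : Int) * k + col) = (((r * K + col.toNat : Nat)) : Int) := by
      push_cast
      rw [Int.toNat_of_nonneg hc0]
    rw [Function.comp_apply, hidx, PySem.List.pyGetD_natCast]
  have hsplit : gatherCol k col padded 0 = gatherCol k col text.toList 0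
      ++ gatherCol k col (List.replicate ((numRows * k).toNat - n) ' ') ((n : Int)) := by
    rw [hpad, gatherCol_append]
    norm_num
    rw [hndef, htl]
  have hrepnil : (gatherCol k col (List.replicate ((numRows * k).toNat - n) ' ') ((n : Int))).filter
      (fun ch => decide (ch ≠ ' ')) = [] := by
    rw [List.filter_eq_nil_iff]
    intro c hc
    have := gather_replicate_space k col _ _ c hc
    simp [this]
  calc ((PySem.List.pyRange 0 numRows 1).filter
          (fun rowIdx => decide (PySem.List.pyGetD padded (rowIdx * k + col) ' ' ≠ ' '))).map
          (fun rowIdx => PySem.List.pyGetD padded (rowIdx * k + col) ' ')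
      = ((PySem.List.pyRange 0 numRows 1).map (fun rowIdx => PySem.List.pyGetD padded (rowIdx * k + col) ' ')).filter
          (fun ch => decide (ch ≠ ' ')) := by
        rw [List.filter_map]
        rfl
    _ = (gatherCol k col padded 0).filter (fun ch => decide (ch ≠ ' ')) := by
        rw [hmapA, hrect]
    _ = (gatherCol k col text.toList 0).filter (fun ch => decide (ch ≠ ' ')) := by
        rw [hsplit, List.filter_append, hrepnil, List.append_nil]
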